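-- pv_equiv track=rewrite | github.com/sang-hwan/trade-bot | strategy/stop_donchian.py | donchian_prev_low
-- ===== SOURCE A (Python) =====
-- from collections import deque
--
-- def donchian_prev_low(lows, n):
--     if n <= 0:
--         raise ValueError("n must be positive")
--     m = len(lows)
--     out = [None] * m
--     dq = deque()
--     for i in range(m):
--         v = lows[i]
--         while dq and dq[-1][1] >= v:
--             dq.pop()
--         dq.append((i, v))
--         while dq and dq[0][0] <= i - n:
--             dq.popleft()
--         t = i + 1
--         if t < m and i >= n - 1:
--             out[t] = dq[0][1]
--     return out
-- ===== SOURCE B (Python) =====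
-- def donchian_prev_low(lows, n):
--     if n <= 0:
--         raise ValueError("n must be positive")
--     m = len(lows)
--     out = [None] * m
--     for t in range(n, m):
--         out[t] = min(lows[t - n:t])
--     return out
-- ===== Notes on version B (the rewrite author's own statement) =====
-- stated objective: simpler
-- what changed: Replaces A's single-pass monotonic-deque sliding minimum by a direct per-output scan: out[t] = min(lows[t-n:t]) for each t in range(n, m), with no deque and no carried state.
import Mathlib
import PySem

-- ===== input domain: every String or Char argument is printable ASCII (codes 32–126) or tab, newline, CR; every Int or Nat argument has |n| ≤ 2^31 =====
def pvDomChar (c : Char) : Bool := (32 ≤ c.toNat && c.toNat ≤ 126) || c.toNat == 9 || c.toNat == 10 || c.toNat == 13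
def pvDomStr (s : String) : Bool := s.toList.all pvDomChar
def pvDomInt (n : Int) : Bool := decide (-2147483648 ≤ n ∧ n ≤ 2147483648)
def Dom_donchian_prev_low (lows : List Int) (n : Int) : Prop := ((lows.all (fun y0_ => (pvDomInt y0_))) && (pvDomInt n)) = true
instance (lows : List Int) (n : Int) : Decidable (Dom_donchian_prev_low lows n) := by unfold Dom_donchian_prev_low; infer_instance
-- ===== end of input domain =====

-- B replaces A's one-pass monotonic deque by a direct per-position window-minimum scan (simpler; not faster).

-- ===== PORT A =====
-- loop body of A's 'for i in range(m)' (the two while-loops are the dropWhile's on the deque ends)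
def pvStepA (lows : List Int) (n : Int) (m : Nat) (st : List (Option Int) × List (Int × Int)) (i : Nat) :
    List (Option Int) × List (Int × Int) :=
  let v := PySem.List.pyGetD lows (i : Int) 0          -- v = lows[i], i always in range
  let dq1 := (st.2.reverse.dropWhile (fun p => decide (v ≤ p.2))).reverse ++ [((i : Int), v)]
  let dq2 := dq1.dropWhile (fun p => decide (p.1 ≤ (i : Int) - n))
  let t := i + 1
  if t < m ∧ n - 1 ≤ (i : Int) then (st.1.set t (some ((dq2.headD (0, 0)).2)), dq2)  -- dq2 nonempty here
  else (st.1, dq2)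

def donchian_prev_low (lows : List Int) (n : Int) : List (Option Int) :=
  if n ≤ 0 then []  -- Python A raises ValueError here; excluded by Pre_
  else
    ((List.range lows.length).foldl (pvStepA lows n lows.length)
      (List.replicate lows.length none, [])).1

-- ===== PORT B =====
def donchian_prev_low_alt (lows : List Int) (n : Int) : List (Option Int) :=
  if n ≤ 0 then []  -- Python B raises ValueError here; excluded by Pre_
  else
    (List.range lows.length).map (fun (t : Nat) =>
      if n ≤ (t : Int) then
        PySem.List.min? (PySem.List.slice lows (some ((t : Int) - n)) (some (t : Int))) (fun y => y)
      else none)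

-- ===== PRECONDITION & SPEC =====
-- Pre_ excludes exactly n ≤ 0, where both Pythons raise ValueError.
def Pre_donchian_prev_low (lows : List Int) (n : Int) : Prop := 0 < n
instance (lows : List Int) (n : Int) : Decidable (Pre_donchian_prev_low lows n) := by
  unfold Pre_donchian_prev_low; infer_instance
def pvWitness_donchian_prev_low : List Int × Int := ([3, 1, 2, 5], 2)
def Spec_donchian_prev_low (lows : List Int) (n : Int) (out : List (Option Int)) : Prop := out = donchian_prev_low_alt lows n
instance (lows : List Int) (n : Int) (out : List (Option Int)) : Decidable (Spec_donchian_prev_low lows n out) := by unfold Spec_donchian_prev_low; infer_instance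

-- ===== CLAIM (what is proved, stated in full; the proofs are below) =====
def Claim_equal_donchian_prev_low : Prop := ∀ (lows : List Int) (n : Int), Dom_donchian_prev_low lows n → Pre_donchian_prev_low lows n → Spec_donchian_prev_low lows n (donchian_prev_low lows n)

-- ===== LEMMAS AND PROOFS =====

-- lows[j] as a total function (all indices used are in range)
def gD (lows : List Int) (j : Nat) : Int := lows.getD j 0

-- "j is a strict suffix minimum up to i": lows[j] < lows[l] for all j < l ≤ i
def monoB (lows : List Int) (i j : Nat) : Bool :=
  (List.range (i + 1)).all (fun l => !(decide (j < l)) || decide (gD lows j < gD lows l))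

-- "index j is in A's deque after iteration i"
def keepB (lows : List Int) (n : Int) (i j : Nat) : Bool :=
  decide ((i : Int) - n < (j : Int)) && monoB lows i j

def idxL (lows : List Int) (n : Int) (i : Nat) : List Nat :=
  (List.range (i + 1)).filter (keepB lows n i)

def pvEmb (lows : List Int) (j : Nat) : Int × Int := ((j : Int), gD lows j)

def dqS (lows : List Int) (n : Int) (i : Nat) : List (Int × Int) :=
  (idxL lows n i).map (pvEmb lows)

-- the window minimum B computes at output position t
def wmin (lows : List Int) (n : Int) (t : Nat) : Option Int :=
  PySem.List.min? (PySem.List.slice lows (some ((t : Int) - n)) (some (t : Int))) (fun y => y)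

-- out array after the first k iterations of A's loop
def outS (lows : List Int) (n : Int) (k : Nat) : List (Option Int) :=
  (List.range lows.length).map (fun (t : Nat) => if n ≤ (t : Int) ∧ t ≤ k then wmin lows n t else none)

-- generic: dropWhile = filter when the predicate only holds on a prefix
theorem dropWhile_eq_filter_of_pairwise {α : Type} (p : α → Bool) (l : List α)
    (h : l.Pairwise (fun a b => p b = true → p a = true)) :
    l.dropWhile p = l.filter (fun x => !p x) := by
  induction l with
  | nil => simp
  | cons x xs ih =>
    rcases List.pairwise_cons.mp h with ⟨hx, hxs⟩
    by_cases hp : p x = true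
    · rw [List.dropWhile_cons_of_pos hp, List.filter_cons_of_neg (by simp [hp]), ih hxs]
    · rw [List.dropWhile_cons_of_neg (by simp [hp]), List.filter_cons_of_pos (by simp [hp])]
      have hall : ∀ b ∈ xs, (!p b) = true := by
        intro b hb
        by_contra hc
        exact hp (hx b hb (by revert hc; cases p b <;> simp))
      rw [List.filter_eq_self.mpr hall]

theorem reverse_dropWhile_reverse {α : Type} (p : α → Bool) (l : List α)
    (h : l.Pairwise (fun a b => p a = true → p b = true)) :
    (l.reverse.dropWhile p).reverse = l.filter (fun x => !p x) := by
  rw [dropWhile_eq_filter_of_pairwise p l.reverse (by simpa [List.pairwise_reverse] using h),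
    ← List.filter_reverse, List.reverse_reverse]

theorem monoB_iff (lows : List Int) (i j : Nat) :
    monoB lows i j = true ↔ ∀ l, l ≤ i → j < l → gD lows j < gD lows l := by
  simp only [monoB, List.all_eq_true, List.mem_range, Nat.lt_succ_iff, Bool.or_eq_true,
    Bool.not_eq_eq_eq_not, Bool.not_true, decide_eq_false_iff_not, decide_eq_true_eq]
  constructor
  · intro h l hl hjl
    rcases h l hl with h1 | h1
    · omega
    · exact h1
  · intro h l hl
    by_cases hjl : j < l
    · exact Or.inr (h l hl hjl)
    · exact Or.inl hjl

theorem keepB_iff (lows : List Int) (n : Int) (i j : Nat) :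
    keepB lows n i j = true ↔
      ((i : Int) - n < (j : Int) ∧ ∀ l, l ≤ i → j < l → gD lows j < gD lows l) := by
  simp only [keepB, Bool.and_eq_true, decide_eq_true_eq, monoB_iff]

theorem idxL_pairwise (lows : List Int) (n : Int) (i : Nat) :
    (idxL lows n i).Pairwise (· < ·) :=
  (List.pairwise_lt_range).filter _

theorem idxL_mem (lows : List Int) (n : Int) (i : Nat) {j : Nat} (hj : j ∈ idxL lows n i) :
    j ≤ i ∧ keepB lows n i j = true := by
  rcases List.mem_filter.mp hj with ⟨h1, h2⟩
  exact ⟨by simpa [Nat.lt_succ_iff] using List.mem_range.mp h1, h2⟩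

theorem emb_pairwise_idx (lows : List Int) (l : List Nat) (h : l.Pairwise (· < ·)) :
    (l.map (pvEmb lows)).Pairwise (fun a b => a.1 < b.1) := by
  refine List.pairwise_map.mpr (h.imp ?_)
  intro a b hab
  simpa [pvEmb] using hab

theorem idxL_pairwise_val (lows : List Int) (n : Int) (i : Nat) :
    (idxL lows n i).Pairwise (fun a b => gD lows a < gD lows b) := by
  refine List.Pairwise.imp_of_mem ?_ (idxL_pairwise lows n i)
  intro a b ha hb hlt
  have hk := (idxL_mem lows n i ha).2
  have hb2 := idxL_mem lows n i hb
  exact ((keepB_iff lows n i a).mp hk).2 b hb2.1 hlt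

theorem dqS_pairwise_val (lows : List Int) (n : Int) (i : Nat) :
    (dqS lows n i).Pairwise (fun a b => a.2 < b.2) := by
  refine List.pairwise_map.mpr ((idxL_pairwise_val lows n i).imp ?_)
  intro a b hab
  simpa [pvEmb] using hab

theorem mono_succ (lows : List Int) (i j : Nat) (hj : j ≤ i) :
    monoB lows (i + 1) j = (monoB lows i j && decide (gD lows j < gD lows (i + 1))) := by
  rw [Bool.eq_iff_iff]
  simp only [monoB_iff, Bool.and_eq_true, decide_eq_true_eq]
  constructor
  · intro h
    exact ⟨fun l hl hjl => h l (by omega) hjl, h (i + 1) (le_refl _) (by omega)⟩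
  · rintro ⟨h1, h2⟩ l hl hjl
    by_cases hli : l ≤ i
    · exact h1 l hli hjl
    · have : l = i + 1 := by omega
      subst this; exact h2

-- after the two while-loops and the append, the index list is exactly as at i+1 but with the old window bound
theorem idx_step (lows : List Int) (n : Int) (hn : 0 < n) (i : Nat) :
    (idxL lows n i).filter (fun j => !decide (gD lows (i + 1) ≤ gD lows j)) ++ [i + 1]
    = (List.range (i + 2)).filter
        (fun (j : Nat) => decide ((i : Int) - n < (j : Int)) && monoB lows (i + 1) j) := by
  rw [idxL, List.filter_filter]
  conv_rhs => rw [show i + 2 = (i + 1) + 1 from rfl, List.range_succ]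
  rw [List.filter_append]
  have h2 : [i + 1].filter
      (fun (j : Nat) => decide ((i : Int) - n < (j : Int)) && monoB lows (i + 1) j) = [i + 1] := by
    have hq2 : monoB lows (i + 1) (i + 1) = true :=
      (monoB_iff lows (i + 1) (i + 1)).mpr (fun l hl hjl => by omega)
    simp [hq2]
    omega
  rw [h2]
  congr 1
  refine List.filter_congr ?_
  intro j hjmem
  have hj : j ≤ i := by simpa [Nat.lt_succ_iff] using List.mem_range.mp hjmem
  rw [keepB, mono_succ lows i j hj, Bool.eq_iff_iff]
  simp only [Bool.and_eq_true, Bool.not_eq_true', decide_eq_true_eq, decide_eq_false_iff_not,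
    not_le]
  tauto

-- the deque after iteration i+1, before expiry, as an index filter
theorem step_dq_mid (lows : List Int) (n : Int) (hn : 0 < n) (i : Nat) :
    ((dqS lows n i).reverse.dropWhile (fun p => decide (gD lows (i + 1) ≤ p.2))).reverse
        ++ [(((i + 1 : Nat) : Int), gD lows (i + 1))]
    = ((List.range (i + 2)).filter
        (fun (j : Nat) => decide ((i : Int) - n < (j : Int)) && monoB lows (i + 1) j)).map (pvEmb lows) := by
  have hpair : (dqS lows n i).Pairwise
      (fun a b => (fun p => decide (gD lows (i + 1) ≤ p.2)) a = true →
        (fun p => decide (gD lows (i + 1) ≤ p.2)) b = true) := by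
    refine (dqS_pairwise_val lows n i).imp ?_
    intro a b hab h
    simp only [decide_eq_true_eq] at *
    omega
  rw [reverse_dropWhile_reverse _ _ hpair, dqS, List.filter_map, ← idx_step lows n hn i]
  have hcomp : ((fun p => !decide (gD lows (i + 1) ≤ p.2)) ∘ pvEmb lows)
      = fun j => !decide (gD lows (i + 1) ≤ gD lows j) := by
    funext j; simp [pvEmb, Function.comp]
  rw [hcomp, List.map_append]
  rfl

-- the deque step: A's iteration i+1 turns dqS i into dqS (i+1)
theorem step_dq (lows : List Int) (n : Int) (hn : 0 < n) (i : Nat) :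
    (((dqS lows n i).reverse.dropWhile (fun p => decide (gD lows (i + 1) ≤ p.2))).reverse
        ++ [(((i + 1 : Nat) : Int), gD lows (i + 1))]).dropWhile
      (fun p => decide (p.1 ≤ ((i + 1 : Nat) : Int) - n))
    = dqS lows n (i + 1) := by
  rw [step_dq_mid lows n hn i]
  set L := (List.range (i + 2)).filter
      (fun (j : Nat) => decide ((i : Int) - n < (j : Int)) && monoB lows (i + 1) j) with hL
  have hLpw : L.Pairwise (· < ·) := (List.pairwise_lt_range).filter _
  have hpair : (L.map (pvEmb lows)).Pairwise
      (fun a b => (fun p => decide (p.1 ≤ ((i + 1 : Nat) : Int) - n)) b = true →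
        (fun p => decide (p.1 ≤ ((i + 1 : Nat) : Int) - n)) a = true) := by
    refine (emb_pairwise_idx lows L hLpw).imp ?_
    intro a b hab h
    simp only [decide_eq_true_eq] at *
    omega
  rw [dropWhile_eq_filter_of_pairwise _ _ hpair, List.filter_map]
  have hcomp : ((fun p => !decide (p.1 ≤ ((i + 1 : Nat) : Int) - n)) ∘ pvEmb lows)
      = fun (j : Nat) => !decide ((j : Int) ≤ ((i + 1 : Nat) : Int) - n) := by
    funext j; simp [pvEmb, Function.comp]
  rw [hcomp, hL, List.filter_filter, dqS, idxL]
  congr 1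
  refine List.filter_congr ?_
  intro j hjmem
  rw [keepB, Bool.eq_iff_iff]
  simp only [Bool.and_eq_true, Bool.not_eq_true', decide_eq_true_eq, decide_eq_false_iff_not,
    not_le]
  push_cast
  constructor
  · rintro ⟨h1, ⟨h2, h3⟩⟩
    exact ⟨by omega, h3⟩
  · rintro ⟨h1, h2⟩
    exact ⟨by omega, ⟨by omega, h2⟩⟩

theorem step_dq_zero (lows : List Int) (n : Int) (hn : 0 < n) :
    (([] ++ [((0 : Int), gD lows 0)] : List (Int × Int)).dropWhile
      (fun p => decide (p.1 ≤ (0 : Int) - n))) = dqS lows n 0 := by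
  have hq : keepB lows n 0 0 = true := by
    rw [keepB_iff]
    exact ⟨by push_cast; omega, fun l hl hjl => by omega⟩
  rw [List.nil_append, List.dropWhile_cons_of_neg (by simp; omega)]
  simp [dqS, idxL, List.range_one, hq, pvEmb]

-- the deque front is the window minimum
-- the window lows[w : w+c] as a map over its index range
theorem window_eq (lows : List Int) (w c : Nat) (hwc : w + c ≤ lows.length) :
    (lows.drop w).take c = (List.range' w c).map (fun j => gD lows j) := by
  apply List.ext_getElem
  · simp; omega
  · intro k h1 h2
    simp only [List.getElem_take, List.getElem_drop, List.getElem_map, List.getElem_range', gD]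
    rw [List.getD_eq_getElem lows 0 (by simp at h1 ⊢; omega)]
    congr 1
    omega

-- the first element of a filtered range is the least index satisfying the predicate
theorem head_filter_range (P : Nat → Bool) (N k : Nat) (hk : k < N) (hPk : P k = true)
    (hmin : ∀ j, j < k → P j = false) :
    ((List.range N).filter P).head? = some k := by
  have hsplit : List.range N = List.range' 0 k ++ List.range' k (N - k) := by
    have happ := List.range'_append_1 (s := 0) (m := k) (n := N - k)
    rw [Nat.zero_add] at happ
    rw [List.range_eq_range']
    conv_lhs => rw [show N = k + (N - k) from by omega]
    exact happ.symm
  rw [hsplit, List.filter_append]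
  rw [List.filter_eq_nil_iff.mpr (by
    intro a ha
    have : a < k := by
      have := List.mem_range'_1.mp ha
      omega
    simp [hmin a this])]
  rw [List.nil_append, show N - k = (N - k - 1) + 1 by omega, List.range'_succ,
    List.filter_cons_of_pos hPk]
  rfl

theorem head_min (lows : List Int) (n : Int) (hn : 0 < n) (i : Nat) (hi : i < lows.length)
    (hni : (n : Int) ≤ (i : Int) + 1) :
    wmin lows n (i + 1) = some (((dqS lows n i).headD (0, 0)).2) := by
  have hnn : ((n.toNat : Nat) : Int) = n := Int.toNat_of_nonneg (by omega)
  set w := i + 1 - n.toNat with hw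
  have hwle : w ≤ i := by omega
  have hcast : (((i + 1 : Nat) : Int) - n) = ((w : Nat) : Int) := by push_cast; omega
  have hslice : PySem.List.slice lows (some (((i + 1 : Nat) : Int) - n)) (some ((i + 1 : Nat) : Int))
      = (List.range' w (i + 1 - w)).map (fun j => gD lows j) := by
    rw [hcast, PySem.List.slice_natCast, window_eq lows w (i + 1 - w) (by omega)]
  set W := (List.range' w (i + 1 - w)).map (fun j => gD lows j) with hW
  have hWmem : ∀ x, x ∈ W ↔ ∃ j, w ≤ j ∧ j < i + 1 ∧ gD lows j = x := by
    intro x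
    simp only [hW, List.mem_map, List.mem_range'_1]
    constructor
    · rintro ⟨j, ⟨hj1, hj2⟩, hj3⟩
      exact ⟨j, hj1, by omega, hj3⟩
    · rintro ⟨j, hj1, hj2, hj3⟩
      exact ⟨j, ⟨hj1, by omega⟩, hj3⟩
  have hWne : W ≠ [] := by
    simp only [hW, ne_eq, List.map_eq_nil_iff, List.range'_eq_nil_iff]
    omega
  obtain ⟨m0, hm0⟩ : ∃ m0, PySem.List.min? W (fun y => y) = some m0 := by
    cases h : PySem.List.min? W (fun y => y) with
    | none => exact absurd ((PySem.List.min?_eq_none_iff W (fun y => y)).mp h) hWne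
    | some z => exact ⟨z, rfl⟩
  have hmem : m0 ∈ W := PySem.List.min?_mem hm0
  have hmin : ∀ y ∈ W, m0 ≤ y := by
    intro y hy
    exact PySem.List.min?_isMin hm0 y hy
  obtain ⟨jm, hjm1, hjm2, hjm3⟩ := (hWmem m0).mp hmem
  set j0 := Nat.findGreatest (fun j => gD lows j = m0) i with hj0
  have hj0P : gD lows j0 = m0 :=
    Nat.findGreatest_spec (P := fun j => gD lows j = m0) (by omega : jm ≤ i) hjm3
  have hjmle : jm ≤ j0 := Nat.le_findGreatest (by omega) hjm3
  have hj0le : j0 ≤ i := Nat.findGreatest_le i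
  have hgrt : ∀ k, j0 < k → k ≤ i → gD lows k ≠ m0 := by
    intro k h1 h2
    exact Nat.findGreatest_is_greatest h1 h2
  have hkeep : keepB lows n i j0 = true := by
    rw [keepB_iff]
    constructor
    · omega
    · intro l hl hjl
      have hlW : gD lows l ∈ W := (hWmem _).mpr ⟨l, by omega, by omega, rfl⟩
      have h1 := hmin _ hlW
      have h2 := hgrt l hjl hl
      rw [hj0P]
      omega
  have hleast : ∀ j, j < j0 → keepB lows n i j = false := by
    intro j hj
    by_contra hc
    have hkt : keepB lows n i j = true := by revert hc; cases keepB lows n i j <;> simp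
    have hk := (keepB_iff lows n i j).mp hkt
    have hjw : w ≤ j := by omega
    have hjW : gD lows j ∈ W := (hWmem _).mpr ⟨j, hjw, by omega, rfl⟩
    have h1 := hmin _ hjW
    have h2 := hk.2 j0 hj0le hj
    rw [hj0P] at h2
    omega
  have hhead : (idxL lows n i).head? = some j0 :=
    head_filter_range (keepB lows n i) (i + 1) j0 (by omega) hkeep hleast
  have hdq : (dqS lows n i).head? = some (pvEmb lows j0) := by
    rw [dqS, List.head?_map, hhead]
    rfl
  obtain ⟨tl, htl⟩ := List.head?_eq_some_iff.mp hdq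
  rw [wmin, hslice, hm0, htl]
  simp [pvEmb, hj0P]

theorem set_map_range {α : Type} (m : Nat) (f : Nat → α) (t : Nat) (v : α) :
    ((List.range m).map f).set t v = (List.range m).map (fun j => if j = t then v else f j) := by
  apply List.ext_getElem
  · simp
  · intro k h1 h2
    simp only [List.getElem_set, List.getElem_map, List.getElem_range]
    by_cases hk : t = k
    · subst hk
      simp
    · simp [hk, Ne.symm hk]

-- A's fold invariant
theorem fold_inv (lows : List Int) (n : Int) (hn : 0 < n) (k : Nat) (hk : k ≤ lows.length) :
    (List.range k).foldl (pvStepA lows n lows.length) (List.replicate lows.length none, [])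
      = (outS lows n k, if k = 0 then [] else dqS lows n (k - 1)) := by
  induction k with
  | zero =>
    simp only [List.range_zero, List.foldl_nil]
    have hnone : ∀ t ∈ List.range lows.length,
        (if (n ≤ (t : Int) ∧ t ≤ 0) then wmin lows n t else none) = (fun _ => (none : Option Int)) t := by
      intro t _
      rw [if_neg]
      rintro ⟨h1, h2⟩
      have : t = 0 := by omega
      subst this
      simp at h1
      omega
    have houts : outS lows n 0 = List.replicate lows.length none := by
      rw [outS, List.map_congr_left hnone, List.map_const', List.length_range]
    rw [houts]
    simp
  | succ k ih =>
    have hk' : k ≤ lows.length := by omega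
    rw [List.range_succ, List.foldl_append, ih hk', List.foldl_cons, List.foldl_nil]
    -- the deque after this step is dqS lows n k
    have hv : PySem.List.pyGetD lows ((k : Nat) : Int) 0 = gD lows k := by
      simp [PySem.List.pyGetD_natCast, gD]
    have hdq : ((((if k = 0 then [] else dqS lows n (k - 1)).reverse.dropWhile
          (fun p => decide (gD lows k ≤ p.2))).reverse
          ++ [(((k : Nat) : Int), gD lows k)]).dropWhile
          (fun p => decide (p.1 ≤ ((k : Nat) : Int) - n))) = dqS lows n k := by
      rcases Nat.eq_zero_or_pos k with hk0 | hk0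
      · subst hk0
        rw [if_pos rfl]
        simpa using step_dq_zero lows n hn
      · rw [if_neg (by omega)]
        have := step_dq lows n hn (k - 1)
        rw [show k - 1 + 1 = k from by omega] at this
        exact this
    unfold pvStepA
    simp only [hv, hdq]
    by_cases hcond : k + 1 < lows.length ∧ n - 1 ≤ (k : Int)
    · rw [if_pos hcond, if_neg (by omega : ¬ k + 1 = 0), Nat.add_sub_cancel, Prod.mk.injEq]
      refine ⟨?_, rfl⟩
      have hhm : wmin lows n (k + 1) = some (((dqS lows n k).headD (0, 0)).2) :=
        head_min lows n hn k (by omega) (by omega)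
      rw [outS, set_map_range, outS]
      refine List.map_congr_left ?_
      intro t ht
      have htm : t < lows.length := List.mem_range.mp ht
      by_cases hts : t = k + 1
      · subst hts
        rw [if_pos rfl, if_pos ⟨by omega, by omega⟩, hhm]
      · rw [if_neg hts]
        by_cases hc2 : n ≤ (t : Int) ∧ t ≤ k
        · rw [if_pos hc2, if_pos ⟨hc2.1, by omega⟩]
        · rw [if_neg hc2, if_neg (by rintro ⟨h1, h2⟩; exact hc2 ⟨h1, by omega⟩)]
    · rw [if_neg hcond, if_neg (by omega : ¬ k + 1 = 0), Nat.add_sub_cancel, Prod.mk.injEq]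
      refine ⟨?_, rfl⟩
      rw [outS, outS]
      refine List.map_congr_left ?_
      intro t ht
      have htm : t < lows.length := List.mem_range.mp ht
      by_cases hc2 : n ≤ (t : Int) ∧ t ≤ k
      · rw [if_pos hc2, if_pos ⟨hc2.1, by omega⟩]
      · rw [if_neg hc2, if_neg ?_]
        rintro ⟨h1, h2⟩
        refine hc2 ⟨h1, ?_⟩
        rcases Nat.lt_or_ge t (k + 1) with h | h
        · omega
        · have hteq : t = k + 1 := by omega
          subst hteq
          exfalso
          exact hcond ⟨by omega, by omega⟩

-- ===== VERDICT (by name: the statement is the Claim_ definition above) =====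
theorem donchian_prev_low_spec : Claim_equal_donchian_prev_low := by
  intro lows n _ hpre
  unfold Pre_donchian_prev_low at hpre
  unfold Spec_donchian_prev_low donchian_prev_low donchian_prev_low_alt
  rw [if_neg (by omega), if_neg (by omega),
    fold_inv lows n hpre lows.length (le_refl _)]
  show outS lows n lows.length = _
  rw [outS]
  apply List.map_congr_left
  intro t ht
  have htm : t < lows.length := List.mem_range.mp ht
  by_cases hnt : n ≤ (t : Int)
  · rw [if_pos ⟨hnt, by omega⟩, if_pos hnt, wmin]
  · rw [if_neg (by rintro ⟨h1, _⟩; exact hnt h1), if_neg hnt]
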